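-- pv_equiv track=rewrite | github.com/adderallbaby/TFL | lab1/main.py | splitOnSameLvl
-- ===== SOURCE A (Python) =====
-- def splitOnSameLvl(line, separator):
--     t = []
--     level = 1
--     prev = 0
--     for i in range(len(line)):
--         char = line[i]
--         if char == "(":
--             level += 1
--         elif char == ")":
--             level -= 1
--         elif char == separator and level == 1:
--             t.append(line[prev:i].strip())
--             prev = i + 1
--     t.append(line[prev:].strip())
--     return t
-- ===== SOURCE B (Python) =====
-- def splitOnSameLvl(line, separator):
--     # Repeated search-and-consume: find the first separator at paren depth 0 of the
--     # remaining text, emit the stripped piece before it, and continue on the rest.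
--     def find_cut(s):
--         depth = 0
--         for i in range(len(s)):
--             ch = s[i]
--             if ch == "(":
--                 depth += 1
--             elif ch == ")":
--                 depth -= 1
--             elif ch == separator and depth == 0:
--                 return i
--         return -1
--
--     parts = []
--     rest = line
--     while True:
--         i = find_cut(rest)
--         if i < 0:
--             parts.append(rest.strip())
--             return parts
--         parts.append(rest[:i].strip())
--         rest = rest[i + 1:]
-- ===== Notes on version B (the rewrite author's own statement) =====
-- stated objective: alternative
-- what changed: B replaces A's single stateful scan (running level + prev pointer + interleaved emission) with a search-and-consume loop: a helper finds the first top-level separator of the remaining text (depth counter restarting at 0 per segment), the piece before it is emitted, and the loop repeats on the suffix after the cut.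
import Mathlib
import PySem

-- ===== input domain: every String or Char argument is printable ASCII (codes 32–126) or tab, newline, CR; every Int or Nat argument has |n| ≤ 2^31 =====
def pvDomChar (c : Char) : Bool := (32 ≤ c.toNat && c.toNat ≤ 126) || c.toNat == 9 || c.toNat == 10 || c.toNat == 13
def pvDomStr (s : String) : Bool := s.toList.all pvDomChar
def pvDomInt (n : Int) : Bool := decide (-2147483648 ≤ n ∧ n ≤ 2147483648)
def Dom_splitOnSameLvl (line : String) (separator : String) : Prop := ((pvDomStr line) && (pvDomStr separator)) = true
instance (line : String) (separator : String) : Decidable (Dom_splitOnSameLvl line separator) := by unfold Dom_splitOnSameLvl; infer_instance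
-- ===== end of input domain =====

-- B replaces A's single stateful scan (level + prev pointer + interleaved emission) by a
-- search-and-consume loop: find the first top-level separator of the remaining text,
-- emit the stripped piece before it, repeat on the suffix (alternative decomposition, same cost).

-- ===== PORT A =====
def splitOnSameLvl (line : String) (separator : String) : List String :=
  let cs := line.toList
  let sep := separator.toList
  let st := (PySem.List.pyRange 0 (cs.length : Int) 1).foldl
    (fun (s : List String × Int × Int) i =>
      let char := PySem.List.pyGetD cs i ' '   -- line[i]; i is always in range here
      if char = '(' then (s.1, s.2.1 + 1, s.2.2)
      else if char = ')' then (s.1, s.2.1 - 1, s.2.2)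
      else if [char] = sep ∧ s.2.1 = 1 then
        (s.1 ++ [String.ofList (PySem.Chars.strip (PySem.List.slice cs (some s.2.2) (some i)))],
         s.2.1, i + 1)
      else s)
    ([], 1, 0)
  st.1 ++ [String.ofList (PySem.Chars.strip (PySem.List.slice cs (some st.2.2) none))]

-- ===== PORT B =====
-- find_cut's early-return for-loop over range(len(s)) with ch = s[i], ported as
-- structural recursion over the enumerated characters (exact: i is the index, ch the char)
def pvFindCut (sep : List Char) : List (Int × Char) → Int → Int
  | [], _ => -1
  | (i, ch) :: r, depth =>
    if ch = '(' then pvFindCut sep r (depth + 1)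
    else if ch = ')' then pvFindCut sep r (depth - 1)
    else if [ch] = sep ∧ depth = 0 then i
    else pvFindCut sep r depth

-- termination helper for the while loop: a found cut index is inside the text
theorem pvFindCut_lt_length (sep : List Char) (rest : List Char) (k d : Int) (hk : 0 ≤ k) :
    pvFindCut sep (PySem.List.enumerate rest k) d < k + rest.length := by
  induction rest generalizing k d with
  | nil => simp [PySem.List.enumerate_nil, pvFindCut]; omega
  | cons c r ih =>
    rw [PySem.List.enumerate_cons]
    unfold pvFindCut
    have h1 := ih (k + 1) (d + 1) (by omega)
    have h2 := ih (k + 1) (d - 1) (by omega)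
    have h3 := ih (k + 1) d (by omega)
    split_ifs <;> simp only [List.length_cons] <;> push_cast at * <;> omega

-- B's while loop; rest shrinks past the found cut each round
def pvBLoop (sep : List Char) (parts : List String) (rest : List Char) : List String :=
  let i := pvFindCut sep (PySem.List.enumerate rest 0) 0
  if h : i < 0 then parts ++ [String.ofList (PySem.Chars.strip rest)]
  else
    pvBLoop sep
      (parts ++ [String.ofList (PySem.Chars.strip (PySem.List.slice rest none (some i)))])
      (PySem.List.slice rest (some (i + 1)) none)
termination_by rest.length
decreasing_by
  have hlt := pvFindCut_lt_length sep rest 0 0 (by omega)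
  rw [PySem.List.slice_from _ (by omega)]
  simp only [List.length_drop]
  omega

def splitOnSameLvl_alt (line : String) (separator : String) : List String :=
  pvBLoop separator.toList [] line.toList

-- ===== PRECONDITION & SPEC =====
def Spec_splitOnSameLvl (line : String) (separator : String) (out : List String) : Prop := out = splitOnSameLvl_alt line separator
instance (line : String) (separator : String) (out : List String) : Decidable (Spec_splitOnSameLvl line separator out) := by unfold Spec_splitOnSameLvl; infer_instance

-- ===== CLAIM (what is proved, stated in full; the proofs are below) =====
def Claim_equal_splitOnSameLvl : Prop := ∀ (line : String) (separator : String), Dom_splitOnSameLvl line separator → Spec_splitOnSameLvl line separator (splitOnSameLvl line separator)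

-- ===== LEMMAS AND PROOFS =====

-- A's loop body on (index, char) pairs, as one named fold (proof-side helper)
def pvAFold (cs sep : List Char) (l : List (Int × Char)) (st : List String × Int × Int) :
    List String × Int × Int :=
  l.foldl
    (fun (s : List String × Int × Int) p =>
      if p.2 = '(' then (s.1, s.2.1 + 1, s.2.2)
      else if p.2 = ')' then (s.1, s.2.1 - 1, s.2.2)
      else if [p.2] = sep ∧ s.2.1 = 1 then
        (s.1 ++ [String.ofList (PySem.Chars.strip (PySem.List.slice cs (some s.2.2) (some p.1)))],
         s.2.1, p.1 + 1)
      else s) st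

-- the stripped slice between two cut points
def pvSeg (cs : List Char) (a b : Int) : String :=
  String.ofList (PySem.Chars.strip (PySem.List.slice cs (some (a + 1)) (some b)))

-- the stripped slices between consecutive cut points
def pvPairs (cs : List Char) (cuts : List Int) : List String :=
  (cuts.zip cuts.tail).map (fun ab => pvSeg cs ab.1 ab.2)

-- the positions of top-level separators in a pair list, starting at a given level
def pvCuts (sep : List Char) : List (Int × Char) → Int → List Int
  | [], _ => []
  | p :: l, lv =>
    if p.2 = '(' then pvCuts sep l (lv + 1)
    else if p.2 = ')' then pvCuts sep l (lv - 1)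
    else if [p.2] = sep ∧ lv = 1 then p.1 :: pvCuts sep l lv
    else pvCuts sep l lv

theorem pvPairs_cons (cs : List Char) (a b : Int) (r : List Int) :
    pvPairs cs (a :: b :: r) = pvSeg cs a b :: pvPairs cs (b :: r) := rfl

-- main A-side invariant: A's fold followed by the final append equals the slice-by-cuts pass
theorem pvMain (cs sep : List Char) (l : List (Int × Char)) (t : List String)
    (lv prev E : Int) :
    (pvAFold cs sep l (t, lv, prev)).1
        ++ [String.ofList (PySem.Chars.strip
              (PySem.List.slice cs (some (pvAFold cs sep l (t, lv, prev)).2.2) (some E)))]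
    = t ++ pvPairs cs ((prev - 1) :: pvCuts sep l lv ++ [E]) := by
  induction l generalizing t lv prev with
  | nil => simp [pvAFold, pvPairs, pvCuts, pvSeg, List.zip]
  | cons p l ih =>
    simp only [pvAFold, List.foldl_cons, pvCuts] at ih ⊢
    by_cases h1 : p.2 = '('
    · simpa [h1] using ih t (lv + 1) prev
    · by_cases h2 : p.2 = ')'
      · simpa [h1, h2] using ih t (lv - 1) prev
      · by_cases h3 : [p.2] = sep ∧ lv = 1
        · have hih := ih (t ++ [String.ofList (PySem.Chars.strip
              (PySem.List.slice cs (some prev) (some p.1)))]) lv (p.1 + 1)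
          simp only [h1, h2, h3, if_false, if_true, and_self, List.cons_append] at hih ⊢
          have hpr : p.1 + 1 - 1 = p.1 := by ring
          rw [hpr] at hih
          rw [hih, pvPairs_cons]
          simp [pvSeg]
        · simpa [h1, h2, h3] using ih t lv prev

-- A's index loop over range(len(line)) is the pair loop over enumerate(line)
theorem pvA_enum (cs sep : List Char) :
    (PySem.List.pyRange 0 (cs.length : Int) 1).foldl
      (fun (s : List String × Int × Int) i =>
        let char := PySem.List.pyGetD cs i ' '
        if char = '(' then (s.1, s.2.1 + 1, s.2.2)
        else if char = ')' then (s.1, s.2.1 - 1, s.2.2)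
        else if [char] = sep ∧ s.2.1 = 1 then
          (s.1 ++ [String.ofList (PySem.Chars.strip (PySem.List.slice cs (some s.2.2) (some i)))],
           s.2.1, i + 1)
        else s) ([], 1, 0)
    = pvAFold cs sep (PySem.List.enumerate cs 0) ([], 1, 0) := by
  have hr : PySem.List.pyRange 0 (cs.length : Int) 1
      = (PySem.List.enumerate cs 0).map (·.1) := by
    simpa using (PySem.List.map_fst_enumerate cs 0).symm
  rw [hr, List.foldl_map, pvAFold]
  refine PySem.List.foldl_congr_mem _ _ _ _ (fun acc p hp => ?_)
  rw [PySem.List.mem_enumerate_iff] at hp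
  obtain ⟨k, hk, rfl⟩ := hp
  simp [PySem.List.pyGetD_natCast, hk]

-- the trailing slice line[prev:] with an explicit end bound
theorem pvSlice_none (xs : List Char) (a : Int) :
    PySem.List.slice xs (some a) none = PySem.List.slice xs (some a) (some (xs.length : Int)) := by
  simp [PySem.List.slice]

-- B-side: positional variant of find_cut (relative index into the char list, -1 if none)
def pvFC (sep : List Char) : List Char → Int → Int
  | [], _ => -1
  | c :: r, d =>
    if c = '(' then (if pvFC sep r (d + 1) < 0 then -1 else pvFC sep r (d + 1) + 1)
    else if c = ')' then (if pvFC sep r (d - 1) < 0 then -1 else pvFC sep r (d - 1) + 1)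
    else if [c] = sep ∧ d = 0 then 0
    else (if pvFC sep r d < 0 then -1 else pvFC sep r d + 1)

theorem pvFC_enum (sep : List Char) (xs : List Char) (k d : Int) :
    pvFindCut sep (PySem.List.enumerate xs k) d
      = if pvFC sep xs d < 0 then -1 else pvFC sep xs d + k := by
  induction xs generalizing k d with
  | nil => simp [PySem.List.enumerate_nil, pvFindCut, pvFC]
  | cons c r ih =>
    rw [PySem.List.enumerate_cons]
    by_cases h1 : c = '('
    · simp only [pvFindCut, pvFC, if_pos h1]
      rw [ih (k + 1) (d + 1)]
      split_ifs <;> omega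
    · by_cases h2 : c = ')'
      · simp only [pvFindCut, pvFC, if_neg h1, if_pos h2]
        rw [ih (k + 1) (d - 1)]
        split_ifs <;> omega
      · by_cases h3 : [c] = sep ∧ d = 0
        · simp only [pvFindCut, pvFC, if_neg h1, if_neg h2, if_pos h3]
          norm_num
        · simp only [pvFindCut, pvFC, if_neg h1, if_neg h2, if_neg h3]
          rw [ih (k + 1) d]
          split_ifs <;> omega

theorem pvFC_bounds (sep : List Char) (xs : List Char) (d : Int) :
    -1 ≤ pvFC sep xs d ∧ pvFC sep xs d < xs.length := by
  induction xs generalizing d with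
  | nil => simp [pvFC]
  | cons c r ih =>
    unfold pvFC
    have h1 := ih (d + 1); have h2 := ih (d - 1); have h3 := ih d
    simp only [List.length_cons]
    split_ifs <;> omega

-- cut lists at two enumeration offsets differ by a uniform shift
theorem pvCuts_shift (sep : List Char) (xs : List Char) (k₁ k₂ lv : Int) :
    pvCuts sep (PySem.List.enumerate xs k₁) lv
      = (pvCuts sep (PySem.List.enumerate xs k₂) lv).map (· + (k₁ - k₂)) := by
  induction xs generalizing k₁ k₂ lv with
  | nil => simp [PySem.List.enumerate_nil, pvCuts]
  | cons c r ih =>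
    rw [PySem.List.enumerate_cons, PySem.List.enumerate_cons]
    unfold pvCuts
    split_ifs with h1 h2 h3
    · rw [ih (k₁ + 1) (k₂ + 1) (lv + 1)]
      simp only [show k₁ + 1 - (k₂ + 1) = k₁ - k₂ from by ring]
    · rw [ih (k₁ + 1) (k₂ + 1) (lv - 1)]
      simp only [show k₁ + 1 - (k₂ + 1) = k₁ - k₂ from by ring]
    · simp only [List.map_cons]
      rw [ih (k₁ + 1) (k₂ + 1) lv]
      simp only [show k₁ + 1 - (k₂ + 1) = k₁ - k₂ from by ring]
      congr 1
      omega
    · rw [ih (k₁ + 1) (k₂ + 1) lv]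
      simp only [show k₁ + 1 - (k₂ + 1) = k₁ - k₂ from by ring]

theorem pvCuts_nonneg (sep : List Char) (xs : List Char) (k lv : Int) (hk : 0 ≤ k) :
    ∀ x ∈ pvCuts sep (PySem.List.enumerate xs k) lv, 0 ≤ x := by
  induction xs generalizing k lv with
  | nil => simp [PySem.List.enumerate_nil, pvCuts]
  | cons c r ih =>
    rw [PySem.List.enumerate_cons]
    unfold pvCuts
    split_ifs with h1 h2 h3
    · exact ih (k + 1) (lv + 1) (by omega)
    · exact ih (k + 1) (lv - 1) (by omega)
    · intro x hx
      rcases List.mem_cons.mp hx with h | h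
      · omega
      · exact ih (k + 1) lv (by omega) x h
    · exact ih (k + 1) lv (by omega)

-- decomposition of the cut list at the first cut found by pvFC
theorem pvCuts_decomp (sep : List Char) (xs : List Char) (k lv : Int) :
    pvCuts sep (PySem.List.enumerate xs k) lv
      = if pvFC sep xs (lv - 1) < 0 then []
        else (pvFC sep xs (lv - 1) + k)
          :: pvCuts sep (PySem.List.enumerate (xs.drop (pvFC sep xs (lv - 1) + 1).toNat)
                (k + pvFC sep xs (lv - 1) + 1)) 1 := by
  induction xs generalizing k lv with
  | nil => simp [PySem.List.enumerate_nil, pvCuts, pvFC]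
  | cons c r ih =>
    rw [PySem.List.enumerate_cons]
    by_cases h1 : c = '('
    · simp only [pvCuts, pvFC, if_pos h1]
      rw [ih (k + 1) (lv + 1)]
      simp only [show lv + 1 - 1 = lv from by ring, show lv - 1 + 1 = lv from by ring]
      set f := pvFC sep r lv with hf
      by_cases hneg : f < 0
      · simp [if_pos hneg]
      · simp only [if_neg hneg]
        rw [if_neg (show ¬ (f + 1 < 0) from by omega)]
        rw [show (f + 1 + 1).toNat = (f + 1).toNat + 1 from by omega]
        simp only [List.drop_succ_cons]
        refine congrArg₂ List.cons (by omega) ?_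
        exact congrArg
          (fun o => pvCuts sep (PySem.List.enumerate (List.drop (f + 1).toNat r) o) 1) (by ring)
    · by_cases h2 : c = ')'
      · simp only [pvCuts, pvFC, if_neg h1, if_pos h2]
        rw [ih (k + 1) (lv - 1)]
        set f := pvFC sep r (lv - 1 - 1) with hf
        by_cases hneg : f < 0
        · simp [if_pos hneg]
        · simp only [if_neg hneg]
          rw [if_neg (show ¬ (f + 1 < 0) from by omega)]
          rw [show (f + 1 + 1).toNat = (f + 1).toNat + 1 from by omega]
          simp only [List.drop_succ_cons]
          refine congrArg₂ List.cons (by omega) ?_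
          exact congrArg
            (fun o => pvCuts sep (PySem.List.enumerate (List.drop (f + 1).toNat r) o) 1) (by ring)
      · by_cases h3 : [c] = sep ∧ lv = 1
        · have h3' : [c] = sep ∧ lv - 1 = 0 := ⟨h3.1, by omega⟩
          simp only [pvCuts, pvFC, if_neg h1, if_neg h2, if_pos h3, if_pos h3']
          rw [if_neg (show ¬ ((0 : Int) < 0) from by omega)]
          norm_num
          rw [h3.2]
        · have h3' : ¬ ([c] = sep ∧ lv - 1 = 0) := by
            intro hc; exact h3 ⟨hc.1, by omega⟩
          simp only [pvCuts, pvFC, if_neg h1, if_neg h2, if_neg h3, if_neg h3']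
          rw [ih (k + 1) lv]
          set f := pvFC sep r (lv - 1) with hf
          by_cases hneg : f < 0
          · simp [if_pos hneg]
          · simp only [if_neg hneg]
            rw [if_neg (show ¬ (f + 1 < 0) from by omega)]
            rw [show (f + 1 + 1).toNat = (f + 1).toNat + 1 from by omega]
            simp only [List.drop_succ_cons]
            refine congrArg₂ List.cons (by omega) ?_
            exact congrArg
              (fun o => pvCuts sep (PySem.List.enumerate (List.drop (f + 1).toNat r) o) 1) (by ring)

-- shifting one stripped segment across a drop
theorem pvSeg_shift (xs : List Char) (a b k : Int)
    (ha : -1 ≤ a) (hb : 0 ≤ b) (hk : 0 ≤ k) :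
    pvSeg xs (a + k) (b + k) = pvSeg (xs.drop k.toNat) a b := by
  unfold pvSeg
  rw [PySem.List.slice_toNat _ (by omega) (by omega),
      PySem.List.slice_toNat _ (by omega) hb,
      List.drop_drop]
  rw [show (a + k + 1).toNat = k.toNat + (a + 1).toNat from by omega]
  rw [show (b + k).toNat = b.toNat + k.toNat from by omega]
  rw [show b.toNat + k.toNat - (k.toNat + (a + 1).toNat) = b.toNat - (a + 1).toNat from by omega]

-- shifting a whole cut list across a drop
theorem pvPairs_shift (xs : List Char) (k : Int) (cuts : List Int)
    (hk : 0 ≤ k)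
    (hall : ∀ x ∈ cuts, -1 ≤ x) (htail : ∀ x ∈ cuts.tail, 0 ≤ x) :
    pvPairs xs (cuts.map (· + k)) = pvPairs (xs.drop k.toNat) cuts := by
  induction cuts with
  | nil => simp [pvPairs]
  | cons a t ih =>
    cases t with
    | nil => simp [pvPairs]
    | cons b r =>
      simp only [List.map_cons] at *
      rw [pvPairs_cons, pvPairs_cons]
      have hb : 0 ≤ b := htail b (List.mem_cons_self ..)
      rw [pvSeg_shift xs a b k (hall a (List.mem_cons_self ..)) hb hk]
      congr 1
      refine ih ?_ ?_
      · intro x hx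
        rcases List.mem_cons.mp hx with h | h
        · omega
        · have := htail x (List.mem_cons_of_mem _ h); omega
      · intro x hx
        exact htail x (List.mem_cons_of_mem _ hx)

-- main B-side invariant: the while loop produces the slice-by-cuts pass
theorem pvBLoop_pairs (sep : List Char) : ∀ (n : Nat) (rest : List Char), rest.length ≤ n →
    ∀ parts, pvBLoop sep parts rest
      = parts ++ pvPairs rest ((-1) :: pvCuts sep (PySem.List.enumerate rest 0) 1
                                ++ [(rest.length : Int)]) := by
  intro n
  induction n with
  | zero =>
    intro rest hlen parts
    cases rest with
    | cons a t => simp at hlen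
    | nil =>
      rw [pvBLoop]
      simp [PySem.List.enumerate_nil, pvFindCut, pvCuts, pvPairs, pvSeg,
        PySem.List.slice]
  | succ n ih =>
    intro rest hlen parts
    rw [pvBLoop]
    rw [pvFC_enum sep rest 0 0]
    have hb := pvFC_bounds sep rest 0
    set j := pvFC sep rest 0 with hj
    by_cases hneg : j < 0
    · rw [dif_pos (by rw [if_pos hneg]; omega)]
      have hcuts : pvCuts sep (PySem.List.enumerate rest 0) 1 = [] := by
        rw [pvCuts_decomp]
        rw [show (1 : Int) - 1 = 0 from by ring, ← hj, if_pos hneg]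
      rw [hcuts]
      refine congrArg (parts ++ ·) ?_
      show [String.ofList (PySem.Chars.strip rest)] = [pvSeg rest (-1) (rest.length : Int)]
      have hseg : pvSeg rest (-1) (rest.length : Int) = String.ofList (PySem.Chars.strip rest) := by
        unfold pvSeg
        rw [show (-1 : Int) + 1 = 0 from by ring, PySem.List.slice_zero_start,
            PySem.List.slice_to _ (by omega), Int.toNat_natCast, List.take_length]
      rw [hseg]
    · rw [dif_neg (by rw [if_neg hneg]; omega)]
      rw [if_neg hneg, add_zero]
      have hrest' : PySem.List.slice rest (some (j + 1)) none = rest.drop (j + 1).toNat :=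
        PySem.List.slice_from _ (by omega)
      rw [hrest']
      set rest' := rest.drop (j + 1).toNat with hr'
      have hlen' : rest'.length = rest.length - (j + 1).toNat := by
        simp [hr', List.length_drop]
      have hle : rest'.length ≤ n := by
        have : (j + 1).toNat ≥ 1 := by omega
        omega
      rw [ih rest' hle]
      rw [List.append_assoc]
      refine congrArg (parts ++ ·) ?_
      -- cut-list decomposition for rest at its first cut
      have hdec := pvCuts_decomp sep rest 0 1
      rw [show (1 : Int) - 1 = 0 from by ring, ← hj, if_neg hneg, add_zero, zero_add] at hdec
      have hshift : pvCuts sep (PySem.List.enumerate (rest.drop (j + 1).toNat) (j + 1)) 1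
          = (pvCuts sep (PySem.List.enumerate rest' 0) 1).map (· + (j + 1)) := by
        rw [pvCuts_shift sep _ (j + 1) 0 1, ← hr']
        norm_num
      rw [hdec, hshift]
      rw [show ((-1 : Int) :: (j :: (pvCuts sep (PySem.List.enumerate rest' 0) 1).map (· + (j + 1)))
              ++ [(rest.length : Int)])
          = (-1 : Int) :: j :: ((pvCuts sep (PySem.List.enumerate rest' 0) 1).map (· + (j + 1))
              ++ [(rest.length : Int)]) from by simp]
      rw [pvPairs_cons]
      rw [List.singleton_append]
      have hlenrel : (rest.length : Int) = (rest'.length : Int) + (j + 1) := by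
        rw [hlen']
        omega
      have hC := pvCuts_nonneg sep rest' 0 1 (by omega)
      have hlist : ((j : Int) :: ((pvCuts sep (PySem.List.enumerate rest' 0) 1).map (· + (j + 1))
              ++ [(rest.length : Int)]))
          = ((-1 : Int) :: pvCuts sep (PySem.List.enumerate rest' 0) 1
              ++ [(rest'.length : Int)]).map (· + (j + 1)) := by
        simp only [List.cons_append, List.map_cons, List.map_append, List.map_nil]
        rw [hlenrel]
        norm_num
      have hall : ∀ x ∈ ((-1 : Int) :: pvCuts sep (PySem.List.enumerate rest' 0) 1
          ++ [(rest'.length : Int)]), -1 ≤ x := by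
        intro x hx
        simp only [List.cons_append, List.mem_cons, List.mem_append] at hx
        rcases hx with h | h | h
        · omega
        · have := hC x h; omega
        · rcases h with rfl | h
          · omega
          · simp at h
      have htl : ∀ x ∈ ((-1 : Int) :: pvCuts sep (PySem.List.enumerate rest' 0) 1
          ++ [(rest'.length : Int)]).tail, 0 ≤ x := by
        intro x hx
        simp only [List.cons_append, List.tail_cons, List.mem_append, List.mem_cons] at hx
        rcases hx with h | h
        · exact hC x h
        · rcases h with rfl | h
          · omega
          · simp at h
      have htail : pvPairs rest ((j : Int) :: ((pvCuts sep (PySem.List.enumerate rest' 0) 1).map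
              (· + (j + 1)) ++ [(rest.length : Int)]))
          = pvPairs rest' ((-1 : Int) :: pvCuts sep (PySem.List.enumerate rest' 0) 1
              ++ [(rest'.length : Int)]) := by
        rw [hlist, pvPairs_shift rest (j + 1) _ (by omega) hall htl]
      rw [htail]
      have hhead : String.ofList (PySem.Chars.strip (PySem.List.slice rest none (some j)))
          = pvSeg rest (-1) j := by
        unfold pvSeg
        rw [show (-1 : Int) + 1 = 0 from by ring, PySem.List.slice_zero_start]
      rw [hhead]

-- ===== VERDICT (by name: the statement is the Claim_ definition above) =====
theorem splitOnSameLvl_spec : Claim_equal_splitOnSameLvl := by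
  intro line separator _
  unfold Spec_splitOnSameLvl splitOnSameLvl splitOnSameLvl_alt
  simp only []
  rw [pvA_enum line.toList separator.toList, pvSlice_none]
  rw [pvBLoop_pairs separator.toList line.toList.length line.toList rfl.le []]
  have h := pvMain line.toList separator.toList (PySem.List.enumerate line.toList 0)
      [] 1 0 (line.toList.length : Int)
  rw [show (0 : Int) - 1 = -1 from by ring] at h
  rw [h]
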